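-- pv_equiv track=rewrite | github.com/HighCaffeineIntake/Python-Projects | Project6RereworkT.py | LF
-- ===== SOURCE A (Python) =====
-- def LF(x):
--     dellist=[]
--     for entry in x:
--         if len(x[entry]) >=100:
--             dellist.append(entry)
--     for entry in dellist:
--         del x[entry]
--     return x
-- ===== SOURCE B (Python) =====
-- # B: keep-oriented one-pass rebuild (comprehension) instead of collect-keys-then-delete;
-- # mutates x in place via clear+update so argument identity is preserved.
-- def LF(x):
--     kept = {k: v for k, v in x.items() if len(v) < 100}
--     x.clear()
--     x.update(kept)
--     return x
-- ===== Notes on version B (the rewrite author's own statement) =====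
-- stated objective: simpler
-- what changed: B inverts A's delete-oriented two-pass (collect keys with a dict lookup per key, then del each) into a single keep-oriented comprehension of the entries with len(v) < 100, reinstalled via clear+update to keep the same dict object.
import Mathlib
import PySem

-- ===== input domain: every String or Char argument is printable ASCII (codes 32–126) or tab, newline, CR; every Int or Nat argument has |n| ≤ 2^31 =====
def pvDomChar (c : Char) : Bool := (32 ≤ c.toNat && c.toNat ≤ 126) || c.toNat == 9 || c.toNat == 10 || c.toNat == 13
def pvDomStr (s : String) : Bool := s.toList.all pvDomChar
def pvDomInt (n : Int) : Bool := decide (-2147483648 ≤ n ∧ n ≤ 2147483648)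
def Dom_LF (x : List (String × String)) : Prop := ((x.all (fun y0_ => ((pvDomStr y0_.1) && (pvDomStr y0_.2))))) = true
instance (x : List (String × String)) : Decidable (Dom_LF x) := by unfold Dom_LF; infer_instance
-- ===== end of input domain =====

-- NOTE: A mutates its dict argument in place (del); the equivalence proved here is about the
-- RETURN value only (B performs the same in-place mutation via clear+update in Python).

-- ===== PORT A =====
-- for entry in x: if len(x[entry]) >= 100: dellist.append(entry); then del x[entry] for each
def LF (x : List (String × String)) : List (String × String) :=
  let dellist : List String :=
    x.foldl (fun acc p =>
      if 100 ≤ PySem.Str.len ((List.lookup p.1 x).getD "") then acc ++ [p.1] else acc) []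
  dellist.foldl (fun d k => d.eraseP (fun p => p.1 == k)) x

-- ===== PORT B =====
-- kept = {k: v for k, v in x.items() if len(v) < 100}
def LF_alt (x : List (String × String)) : List (String × String) :=
  x.filter (fun p => PySem.Str.len p.2 < 100)

-- ===== PRECONDITION & SPEC =====
-- Pre_: the argument is a Python dict, whose keys are necessarily distinct;
-- it excludes no dict input (an association list with duplicate keys denotes no dict).
def Pre_LF (x : List (String × String)) : Prop := (x.map Prod.fst).Nodup
instance (x : List (String × String)) : Decidable (Pre_LF x) := by unfold Pre_LF; infer_instance
def pvWitness_LF : (List (String × String)) := [("a", "short"), ("b", "")]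
def Spec_LF (x : List (String × String)) (out : List (String × String)) : Prop := out = LF_alt x
instance (x : List (String × String)) (out : List (String × String)) : Decidable (Spec_LF x out) := by unfold Spec_LF; infer_instance

-- ===== CLAIM (what is proved, stated in full; the proofs are below) =====
def Claim_equal_LF : Prop := ∀ (x : List (String × String)), Dom_LF x → Pre_LF x → Spec_LF x (LF x)

-- ===== LEMMAS AND PROOFS =====

-- with distinct keys, the lookup of a member pair's key returns its own value
theorem lookup_self_of_nodup (x : List (String × String)) (h : (x.map Prod.fst).Nodup)
    {p : String × String} (hp : p ∈ x) : List.lookup p.1 x = some p.2 := by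
  induction x with
  | nil => cases hp
  | cons q t ih =>
    simp only [List.map_cons, List.nodup_cons] at h
    rcases List.mem_cons.1 hp with rfl | hpt
    · simp [List.lookup]
    · have hne : (p.1 == q.1) = false :=
        beq_eq_false_iff_ne.mpr (fun e => h.1 (e ▸ List.mem_map_of_mem hpt))
      rw [List.lookup, hne]
      exact ih h.2 hpt

-- A's dellist (relative to a fixed lookup table x0 agreeing on members) is the keys of the big entries
theorem dellist_eq (x0 : List (String × String)) (x : List (String × String)) (acc : List String)
    (h : ∀ p ∈ x, List.lookup p.1 x0 = some p.2) :
    x.foldl (fun acc p =>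
      if 100 ≤ PySem.Str.len ((List.lookup p.1 x0).getD "") then acc ++ [p.1] else acc) acc
    = acc ++ (x.filter (fun p => 100 ≤ PySem.Str.len p.2)).map Prod.fst := by
  induction x generalizing acc with
  | nil => simp
  | cons q t ih =>
    have hq := h q (List.mem_cons_self ..)
    have ht : ∀ p ∈ t, List.lookup p.1 x0 = some p.2 := fun p hp => h p (List.mem_cons_of_mem _ hp)
    rw [List.foldl_cons]
    by_cases hc : 100 ≤ PySem.Str.len q.2
    · rw [show (if 100 ≤ PySem.Str.len ((List.lookup q.1 x0).getD "") then acc ++ [q.1] else acc)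
            = acc ++ [q.1] by rw [hq]; exact if_pos hc,
        ih _ ht, List.filter_cons_of_pos (by simpa using hc), List.map_cons]
      simp
    · rw [show (if 100 ≤ PySem.Str.len ((List.lookup q.1 x0).getD "") then acc ++ [q.1] else acc)
            = acc by rw [hq]; exact if_neg hc,
        ih _ ht, List.filter_cons_of_neg (by simpa using hc)]

-- erasing exactly the keys of the big entries from x (keys distinct) is filtering them out
theorem erase_big_keys (x : List (String × String)) (h : (x.map Prod.fst).Nodup) :
    ((x.filter (fun p => 100 ≤ PySem.Str.len p.2)).map Prod.fst).foldl
      (fun d k => d.eraseP (fun p => p.1 == k)) x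
    = x.filter (fun p => PySem.Str.len p.2 < 100) := by
  induction x with
  | nil => rfl
  | cons q t ih =>
    simp only [List.map_cons, List.nodup_cons] at h
    have hqt : ∀ p ∈ t, p.1 ≠ q.1 := by
      intro p hp he; exact h.1 (he ▸ List.mem_map_of_mem hp)
    by_cases hc : 100 ≤ PySem.Str.len q.2
    · -- q is deleted: first erase removes q (head match), rest proceeds on t
      rw [List.filter_cons_of_pos (by simpa using hc), List.map_cons, List.foldl_cons]
      have herase : (q :: t).eraseP (fun p => p.1 == q.1) = t := by
        simp
      rw [herase, ih h.2,
        List.filter_cons_of_neg (by simp [PySem.Str.len_eq] at hc ⊢; omega)]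
    · -- q is kept: every erased key differs from q.1, so each eraseP skips the head
      rw [List.filter_cons_of_neg (by simpa using hc)]
      have hkeys : ∀ k ∈ (t.filter (fun p => 100 ≤ PySem.Str.len p.2)).map Prod.fst, q.1 ≠ k := by
        intro k hk
        rcases List.mem_map.1 hk with ⟨p, hp, rfl⟩
        exact fun he => (hqt p (List.mem_of_mem_filter hp)) he.symm
      -- foldl over q :: t where each step\'s eraseP keeps q at the head
      have hstep : ∀ (ks : List String) (d : List (String × String)),
          (∀ k ∈ ks, q.1 ≠ k) →
          ks.foldl (fun d k => d.eraseP (fun p => p.1 == k)) (q :: d)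
          = q :: ks.foldl (fun d k => d.eraseP (fun p => p.1 == k)) d := by
        intro ks
        induction ks with
        | nil => intro d _; rfl
        | cons k kt ihk =>
          intro d hne
          have h1 : (q :: d).eraseP (fun p => p.1 == k) = q :: d.eraseP (fun p => p.1 == k) := by
            have : (q.1 == k) = false := beq_eq_false_iff_ne.mpr (hne k (List.mem_cons_self ..))
            simp [this]
          rw [List.foldl_cons, h1, ihk _ (fun k' hk' => hne k' (List.mem_cons_of_mem _ hk')),
            List.foldl_cons]
      rw [hstep _ _ hkeys, ih h.2,
        List.filter_cons_of_pos (by simp [PySem.Str.len_eq] at hc ⊢; omega)]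

-- ===== VERDICT (by name: the statement is the Claim_ definition above) =====
theorem LF_spec : Claim_equal_LF := by
  intro x _ hpre
  unfold Spec_LF LF LF_alt
  have hlook : ∀ p ∈ x, List.lookup p.1 x = some p.2 :=
    fun p hp => lookup_self_of_nodup x hpre hp
  rw [dellist_eq x x [] hlook]
  simp only [List.nil_append]
  exact erase_big_keys x hpre
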